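-- pv_equiv track=rewrite | github.com/KaspijaALT/osint-wordlist-generator | script.py | case_variants
-- ===== SOURCE A (Python) =====
-- from typing import Iterable, List, Set, Tuple
--
-- FULL_CASE_MAX_LEN = 6       # only do per-letter case permutations for tokens shorter than this by default
--
-- def case_variants(token: str, modes: List[str], full_case_max_len: int = FULL_CASE_MAX_LEN) -> Iterable[str]:
--     """Yield case variants for a token.
--        modes can include 'lower','upper','title','asis','allcases' (allcases: every per-letter casing if short)."""
--     seen = set()
--     token = token.strip()
--     basic = []
--     for m in modes:
--         if m == 'lower':
--             basic.append(token.lower())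
--         elif m == 'upper':
--             basic.append(token.upper())
--         elif m == 'title':
--             basic.append(token.title())
--         elif m == 'asis':
--             basic.append(token)
--     for b in basic:
--         if b not in seen:
--             seen.add(b)
--             yield b
--
--     if 'allcases' in modes and len(token) <= full_case_max_len:
--         # generate all per-letter casing combos (2^n)
--         n = len(token)
--         for mask in range(1 << n):
--             s = []
--             for i, ch in enumerate(token):
--                 if ch.isalpha() and (mask & (1 << i)):
--                     s.append(ch.upper())
--                 else:
--                     s.append(ch.lower())
--             v = ''.join(s)
--             if v not in seen:
--                 seen.add(v)
--                 yield v
-- ===== SOURCE B (Python) =====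
-- # B: same variants, but the 'allcases' block enumerates only the 2^k alphabetic
-- # positions (building variants as a product over characters) instead of all 2^n
-- # masks; basic modes are dispatched through a function table. A is a generator;
-- # B is too — equivalence is about the yielded sequence.
-- _CASE_FUNCS = {'lower': str.lower, 'upper': str.upper, 'title': str.title, 'asis': str}
--
-- def case_variants(token, modes, full_case_max_len=6):
--     token = token.strip()
--     seen = set()
--     for m in modes:
--         f = _CASE_FUNCS.get(m)
--         if f is None:
--             continue
--         v = f(token)
--         if v not in seen:
--             seen.add(v)
--             yield v
--     if 'allcases' in modes and len(token) <= full_case_max_len: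
--         acc = ['']
--         for ch in reversed(token):
--             lo = ch.lower()
--             cases = (lo, ch.upper()) if ch.isalpha() else (lo,)
--             acc = [c + v for v in acc for c in cases]
--         for v in acc:
--             if v not in seen:
--                 seen.add(v)
--                 yield v
-- ===== Notes on version B (the rewrite author's own statement) =====
-- stated objective: alternative
-- what changed: The 'allcases' block builds the distinct variants directly as a product over the token's characters in which only alphabetic positions branch (2^k strings for k letters, no seen-set scan over the 2^n duplicate masks), instead of A's loop over all 2^n bitmasks of every position; the basic modes are dispatched through a function table instead of an if/elif chain.
import Mathlib
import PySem

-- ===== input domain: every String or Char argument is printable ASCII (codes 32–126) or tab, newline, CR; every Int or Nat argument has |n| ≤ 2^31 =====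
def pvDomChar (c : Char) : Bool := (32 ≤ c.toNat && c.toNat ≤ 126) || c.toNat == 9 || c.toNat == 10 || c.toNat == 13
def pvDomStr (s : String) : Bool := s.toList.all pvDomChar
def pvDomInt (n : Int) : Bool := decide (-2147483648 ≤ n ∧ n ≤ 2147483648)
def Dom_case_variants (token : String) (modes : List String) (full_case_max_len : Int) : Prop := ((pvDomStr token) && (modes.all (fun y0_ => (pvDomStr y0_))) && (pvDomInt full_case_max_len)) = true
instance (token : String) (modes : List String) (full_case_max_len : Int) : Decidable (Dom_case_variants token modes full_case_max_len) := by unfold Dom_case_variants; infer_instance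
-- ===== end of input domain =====

-- B changes the 'allcases' enumeration: a product over the characters in which only
-- alphabetic positions branch, instead of A's loop over all 2^n masks; the basic modes
-- are dispatched through a function table. Python A and B are generators; the
-- equivalence is about the yielded sequence, materialised here as a list.

-- hand port of Python's str.title (no PySem primitive): a letter is uppercased iff the
-- previous character is not a letter, and lowercased otherwise; other characters pass
-- through. Exact on the ASCII domain, where the cased characters are exactly the letters.
def pvTitleAux : Bool → List Char → List Char
  | _, [] => []
  | prev, c :: cs =>
      (if PySem.Chars.isalpha c then
         (if prev then PySem.Chars.lowerChar c else PySem.Chars.upperChar c)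
       else c) :: pvTitleAux (PySem.Chars.isalpha c) cs

def pvTitle (s : String) : String := String.ofList (pvTitleAux false s.toList)

-- the literal 'if v not in seen: seen.add(v); yield v' step both Pythons contain
def pvStep (st : PySem.Set String × List String) (v : String) : PySem.Set String × List String :=
  if PySem.Set.contains st.1 v then st
  else (PySem.Set.add st.1 v, st.2 ++ [v])

-- ===== PORT A =====
-- literal port of A; the generator's yields are collected into the result list;
-- 'for i, ch in enumerate(token)' is the fold over token.toList.zipIdx (= (ch, i) pairs)
def case_variants (token : String) (modes : List String) (full_case_max_len : Int) : List String :=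
  let tok := PySem.Str.strip token
  let basic : List String := modes.foldl (fun acc m =>
      if m == "lower" then acc ++ [PySem.Str.lower tok]
      else if m == "upper" then acc ++ [PySem.Str.upper tok]
      else if m == "title" then acc ++ [pvTitle tok]
      else if m == "asis" then acc ++ [tok]
      else acc) []
  let st := basic.foldl pvStep (PySem.Set.empty, [])
  if "allcases" ∈ modes ∧ PySem.Str.len tok ≤ full_case_max_len then
    let n := tok.toList.length
    let st2 := (PySem.List.pyRange 0 ((1 : Int) <<< n) 1).foldl (fun st mask =>
        pvStep st (String.ofList (tok.toList.zipIdx.foldl (fun s ic =>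
            if PySem.Chars.isalpha ic.1 && (PySem.Int.band mask ((1 : Int) <<< (ic.2 : Int)) != 0)
            then s ++ [PySem.Chars.upperChar ic.1]
            else s ++ [PySem.Chars.lowerChar ic.1]) []))) st
    st2.2
  else st.2

-- ===== PORT B =====
def pvCaseFuncs : PySem.Dict String (String → String) :=
  PySem.Dict.ofList
    [("lower", PySem.Str.lower), ("upper", PySem.Str.upper),
     ("title", pvTitle), ("asis", fun s => s)]

def case_variants_alt (token : String) (modes : List String) (full_case_max_len : Int) : List String :=
  let tok := PySem.Str.strip token
  let st := modes.foldl (fun st m =>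
      match PySem.Dict.get? pvCaseFuncs m with
      | none => st
      | some f => pvStep st (f tok)) (PySem.Set.empty, [])
  if "allcases" ∈ modes ∧ PySem.Str.len tok ≤ full_case_max_len then
    let acc : List (List Char) := tok.toList.reverse.foldl (fun acc ch =>
        let cases := if PySem.Chars.isalpha ch
          then [PySem.Chars.lowerChar ch, PySem.Chars.upperChar ch]
          else [PySem.Chars.lowerChar ch]
        acc.flatMap (fun v => cases.map (· :: v))) [[]]
    let st2 := acc.foldl (fun st v => pvStep st (String.ofList v)) st
    st2.2
  else st.2

-- ===== PRECONDITION & SPEC =====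
def Spec_case_variants (token : String) (modes : List String) (full_case_max_len : Int) (out : List String) : Prop := out = case_variants_alt token modes full_case_max_len
instance (token : String) (modes : List String) (full_case_max_len : Int) (out : List String) : Decidable (Spec_case_variants token modes full_case_max_len out) := by unfold Spec_case_variants; infer_instance

-- ===== CLAIM (what is proved, stated in full; the proofs are below) =====
def Claim_equal_case_variants : Prop := ∀ (token : String) (modes : List String) (full_case_max_len : Int), Dom_case_variants token modes full_case_max_len → Spec_case_variants token modes full_case_max_len (case_variants token modes full_case_max_len)

-- ===== LEMMAS AND PROOFS =====

-- the basic variants contributed by one mode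
def pvModeVal (tok : String) (m : String) : List String :=
  if m == "lower" then [PySem.Str.lower tok]
  else if m == "upper" then [PySem.Str.upper tok]
  else if m == "title" then [pvTitle tok]
  else if m == "asis" then [tok]
  else []

-- first-occurrence dedup relative to an already-seen list
def pvDD {α : Type} [DecidableEq α] : List α → List α → List α
  | _, [] => []
  | S, x :: xs => if x ∈ S then pvDD S xs else x :: pvDD (S ++ [x]) xs

theorem pvDD_congr {α : Type} [DecidableEq α] (xs : List α) : ∀ S T : List α,
    (∀ v, v ∈ S ↔ v ∈ T) → pvDD S xs = pvDD T xs := by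
  induction xs with
  | nil => intro S T h; rfl
  | cons x xs ih =>
    intro S T h
    simp only [pvDD]
    by_cases hx : x ∈ S
    · rw [if_pos hx, if_pos ((h x).mp hx)]; exact ih S T h
    · rw [if_neg hx, if_neg (fun c => hx ((h x).mpr c))]
      congr 1
      exact ih _ _ (fun v => by simp [h v])

theorem mem_pvDD {α : Type} [DecidableEq α] (xs : List α) : ∀ (S : List α) (v : α),
    v ∈ pvDD S xs ↔ v ∈ xs ∧ v ∉ S := by
  induction xs with
  | nil => simp [pvDD]
  | cons x xs ih =>
    intro S v
    simp only [pvDD]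
    by_cases hx : x ∈ S
    · rw [if_pos hx, ih]
      constructor
      · rintro ⟨h1, h2⟩; exact ⟨List.mem_cons_of_mem _ h1, h2⟩
      · rintro ⟨h1, h2⟩
        rcases List.mem_cons.mp h1 with rfl | h1
        · exact absurd hx h2
        · exact ⟨h1, h2⟩
    · rw [if_neg hx]
      simp only [List.mem_cons, ih, List.mem_append]
      constructor
      · rintro (rfl | ⟨h1, h2⟩)
        · exact ⟨Or.inl rfl, hx⟩
        · exact ⟨Or.inr h1, fun c => h2 (Or.inl c)⟩
      · rintro ⟨rfl | h1, h2⟩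
        · exact Or.inl rfl
        · by_cases hvx : v = x
          · exact Or.inl hvx
          · exact Or.inr ⟨h1, by simp [h2, hvx]⟩

theorem pvDD_filter {α : Type} [DecidableEq α] (xs : List α) : ∀ S T : List α,
    pvDD (S ++ T) xs = (pvDD T xs).filter (fun v => decide (v ∉ S)) := by
  induction xs with
  | nil => intro S T; rfl
  | cons x xs ih =>
    intro S T
    simp only [pvDD]
    by_cases hT : x ∈ T
    · rw [if_pos (by simp [hT]), if_pos hT, ih]
    · rw [if_neg hT]
      by_cases hS : x ∈ S
      · rw [if_pos (by simp [hS])]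
        simp only [List.filter_cons, decide_eq_true_eq]
        rw [if_neg (by simp [hS])]
        have : pvDD (S ++ T) xs = pvDD (S ++ (T ++ [x])) xs :=
          pvDD_congr xs _ _ (fun v => by
            simp only [List.mem_append, List.mem_singleton]
            constructor
            · tauto
            · rintro (h | h | rfl)
              exacts [Or.inl h, Or.inr h, Or.inl hS])
        rw [this, ih]
      · rw [if_neg (by simp [hS, hT])]
        simp only [List.filter_cons, decide_eq_true_eq]
        rw [if_pos (by simp [hS])]
        congr 1
        rw [pvDD_congr xs (S ++ T ++ [x]) (S ++ (T ++ [x])) (fun v => by simp), ih]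

theorem pvDD_base {α : Type} [DecidableEq α] (xs S : List α) :
    pvDD S xs = (pvDD [] xs).filter (fun v => decide (v ∉ S)) := by
  have := pvDD_filter xs S []
  simpa using this

theorem pvDD_append {α : Type} [DecidableEq α] (xs : List α) : ∀ (ys S : List α),
    pvDD S (xs ++ ys) = pvDD S xs ++ pvDD (S ++ pvDD S xs) ys := by
  induction xs with
  | nil => intro ys S; simp [pvDD]
  | cons x xs ih =>
    intro ys S
    by_cases hx : x ∈ S
    · simp only [List.cons_append, pvDD, if_pos hx]
      exact ih ys S
    · simp only [List.cons_append, pvDD, if_neg hx]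
      rw [ih]
      congr 2
      exact pvDD_congr ys _ _ (fun v => by
        simp only [List.mem_append, List.mem_cons]
        tauto)

theorem nodup_pvDD {α : Type} [DecidableEq α] (xs : List α) : ∀ S : List α, (pvDD S xs).Nodup := by
  induction xs with
  | nil => intro S; simp [pvDD]
  | cons x xs ih =>
    intro S
    simp only [pvDD]
    by_cases hx : x ∈ S
    · rw [if_pos hx]; exact ih S
    · rw [if_neg hx]
      refine List.nodup_cons.mpr ⟨fun c => ?_, ih _⟩
      have := (mem_pvDD xs _ x).mp c
      simp at this

theorem pvDD_eq_self {α : Type} [DecidableEq α] (xs : List α) : ∀ S : List α,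
    xs.Nodup → (∀ x ∈ xs, x ∉ S) → pvDD S xs = xs := by
  induction xs with
  | nil => intro S _ _; rfl
  | cons x xs ih =>
    intro S hnd hd
    simp only [pvDD]
    rw [if_neg (hd x (by simp))]
    congr 1
    refine ih _ (List.nodup_cons.mp hnd).2 ?_
    intro y hy
    simp only [List.mem_append, List.mem_singleton]
    rintro (h | rfl)
    · exact hd y (by simp [hy]) h
    · exact (List.nodup_cons.mp hnd).1 hy

theorem pvDD_map {α β : Type} [DecidableEq α] [DecidableEq β] (f : α → β)
    (hf : Function.Injective f) (xs : List α) : ∀ S : List α,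
    pvDD (S.map f) (xs.map f) = (pvDD S xs).map f := by
  induction xs with
  | nil => intro S; rfl
  | cons x xs ih =>
    intro S
    simp only [List.map_cons, pvDD]
    by_cases hx : x ∈ S
    · rw [if_pos (List.mem_map_of_mem hx), if_pos hx, ih]
    · rw [if_neg (fun c => hx (by rcases List.mem_map.mp c with ⟨y, hy, he⟩; rwa [← hf he])),
        if_neg hx]
      simp only [List.map_cons]
      congr 1
      have := ih (S ++ [x])
      simpa using this

theorem pvFlatMap_ne {α β : Type} [DecidableEq α] (l : List α) (x : α) (f : α → List β) :
    (l.filter (fun r => decide (r ≠ x))).flatMap f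
      = l.flatMap (fun r => if r = x then [] else f r) := by
  induction l with
  | nil => rfl
  | cons a l ih =>
    simp only [List.filter_cons, List.flatMap_cons, decide_eq_true_eq]
    by_cases ha : a = x
    · rw [if_neg (by simp [ha]), if_pos ha, ih]; simp
    · rw [if_pos (by simp [ha]), if_neg ha]
      simp only [List.flatMap_cons, ih]

theorem pvDD_flatMap {α β : Type} [DecidableEq α] [DecidableEq β] (g : α → List β) :
    ∀ l : List α, (∀ r₁ ∈ l, ∀ r₂ ∈ l, ∀ y, y ∈ g r₁ → y ∈ g r₂ → r₁ = r₂) →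
    pvDD [] (l.flatMap g) = (pvDD [] l).flatMap (fun r => pvDD [] (g r)) := by
  intro l
  induction l with
  | nil => intro _; rfl
  | cons x l ih =>
    intro hdisj
    simp only [List.flatMap_cons]
    rw [pvDD_append]
    have hmemgx : ∀ y, y ∈ pvDD [] (g x) ↔ y ∈ g x := by
      intro y; rw [mem_pvDD]; simp
    have hseen : pvDD ([] ++ pvDD [] (g x)) (l.flatMap g) = pvDD (pvDD [] (g x)) (l.flatMap g) := by
      simp
    rw [hseen, pvDD_base (l.flatMap g) (pvDD [] (g x)),
      ih (fun r₁ h1 r₂ h2 => hdisj r₁ (by simp [h1]) r₂ (by simp [h2])),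
      List.filter_flatMap]
    have hblocks : ∀ r ∈ pvDD [] l,
        (pvDD [] (g r)).filter (fun v => decide (v ∉ pvDD [] (g x)))
          = if r = x then [] else pvDD [] (g r) := by
      intro r hr
      have hrl : r ∈ l := ((mem_pvDD l [] r).mp hr).1
      by_cases hrx : r = x
      · subst hrx
        rw [if_pos rfl]
        apply List.filter_eq_nil_iff.mpr
        intro v hv
        simp [hmemgx, ((mem_pvDD (g r) [] v).mp hv).1]
      · rw [if_neg hrx]
        apply List.filter_eq_self.mpr
        intro v hv
        have hvr : v ∈ g r := ((mem_pvDD (g r) [] v).mp hv).1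
        simp only [decide_eq_true_eq]
        rw [hmemgx]
        intro hvx
        exact hrx (hdisj r (by simp [hrl]) x (by simp) v hvr hvx)
    rw [List.flatMap_congr hblocks]
    have hx : pvDD ([] : List α) (x :: l) = x :: pvDD [x] l := by simp [pvDD]
    rw [hx, List.flatMap_cons]
    congr 1
    have h1 : pvDD [x] l = (pvDD [] l).filter (fun v => decide (v ≠ x)) := by
      rw [pvDD_base l [x]]
      congr 1
      funext v
      simp
    rw [h1, pvFlatMap_ne]

-- the emission loop, characterised by pvDD
theorem pvEmitFold (xs : List String) : ∀ (S : PySem.Set String) (out : List String),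
    xs.foldl pvStep (S, out) = (S ++ pvDD S xs, out ++ pvDD S xs) := by
  induction xs with
  | nil => intro S out; simp [pvDD]
  | cons x xs ih =>
    intro S out
    simp only [List.foldl_cons, pvStep, pvDD]
    by_cases hx : x ∈ S
    · rw [if_pos (by simp [PySem.Set.contains_eq_listContains, hx]),
        if_pos hx]
      exact ih S out
    · rw [if_neg (by simp [PySem.Set.contains_eq_listContains, hx]),
        if_neg hx]
      rw [PySem.Set.add_of_not_mem hx, ih]
      simp

-- ASCII cased characters: lower and upper really differ
theorem pvCharBound {a c : Char} (h : a ≤ c) : a.toNat ≤ c.toNat := by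
  rw [Char.le_def] at h; exact UInt32.le_iff_toNat_le.mp h

theorem pvLowerNeUpper (c : Char) (h : PySem.Chars.isalpha c = true) :
    PySem.Chars.lowerChar c ≠ PySem.Chars.upperChar c := by
  simp [PySem.Chars.isalpha, PySem.Chars.isupper, PySem.Chars.islower] at h
  have hv : ∀ n : Nat, n < 1000 → (Char.ofNat n).toNat = n := by
    intro n hn; rw [Char.toNat_ofNat, if_pos]; left; omega
  have eA : ('A' : Char).toNat = 65 := rfl
  have eZ : ('Z' : Char).toNat = 90 := rfl
  have ea : ('a' : Char).toNat = 97 := rfl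
  have ez : ('z' : Char).toNat = 122 := rfl
  rcases h with ⟨h1, h2⟩ | ⟨h1, h2⟩
  · have hA := pvCharBound h1; have hZ := pvCharBound h2
    rw [eA] at hA; rw [eZ] at hZ
    have hup : PySem.Chars.isupper c = true := by
      simp [PySem.Chars.isupper]; exact ⟨h1, h2⟩
    have hnl : PySem.Chars.islower c = false := by
      simp [PySem.Chars.islower]
      intro hc; exfalso; have := pvCharBound hc; rw [ea] at this; omega
    simp only [PySem.Chars.lowerChar, PySem.Chars.upperChar, hup, hnl, if_pos,
      Bool.false_eq_true, if_false]
    intro he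
    have := congrArg Char.toNat he
    rw [hv _ (by omega)] at this; omega
  · have hA := pvCharBound h1; have hZ := pvCharBound h2
    rw [ea] at hA; rw [ez] at hZ
    have hlo : PySem.Chars.islower c = true := by
      simp [PySem.Chars.islower]; exact ⟨h1, h2⟩
    have hnu : PySem.Chars.isupper c = false := by
      simp [PySem.Chars.isupper]
      intro _
      rw [Char.lt_def]
      apply UInt32.lt_iff_toNat_lt.mpr
      show ('Z' : Char).toNat < c.toNat
      omega
    simp only [PySem.Chars.lowerChar, PySem.Chars.upperChar, hlo, hnu, if_true,
      Bool.false_eq_true, if_false]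
    intro he
    have := congrArg Char.toNat he
    rw [hv _ (by omega)] at this; omega

-- ===== A's mask enumeration, structurally =====
def pvPhi (c : Char) (b : Bool) : Char :=
  if PySem.Chars.isalpha c && b then PySem.Chars.upperChar c else PySem.Chars.lowerChar c

def pvARaw : List Char → List (List Char)
  | [] => [[]]
  | c :: cs => (pvARaw cs).flatMap (fun r => [pvPhi c false :: r, pvPhi c true :: r])

def pvMaskStr (cs : List Char) (mask : Int) : List Char :=
  cs.zipIdx.map (fun ic =>
    if PySem.Chars.isalpha ic.1 && (PySem.Int.band mask ((1 : Int) <<< (ic.2 : Int)) != 0)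
    then PySem.Chars.upperChar ic.1 else PySem.Chars.lowerChar ic.1)

theorem pvShift (n : Nat) : (1 : Int) <<< n = ((2 ^ n : Nat) : Int) := by
  rw [Int.shiftLeft_eq]; push_cast; ring

theorem pvBandBit (m k : Nat) :
    (PySem.Int.band (m : Int) ((1 : Int) <<< (k : Int)) != 0) = m.testBit k := by
  rw [Int.shiftLeft_natCast_right, pvShift]
  rw [PySem.Int.band_natCast]
  rw [Nat.and_two_pow]
  cases h : m.testBit k
  · simp
  · simp

theorem pvRangeDouble (m : Nat) :
    List.range (2 * m) = (List.range m).flatMap (fun q => [2 * q, 2 * q + 1]) := by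
  induction m with
  | zero => rfl
  | succ m ih =>
    rw [show 2 * (m + 1) = (2 * m) + 1 + 1 by ring, List.range_succ, List.range_succ,
      List.range_succ, ih]
    simp [List.flatMap_append]

theorem pvZipIdxCons (c : Char) (cs : List Char) :
    (c :: cs).zipIdx = (c, 0) :: cs.zipIdx.map (fun p => (p.1, p.2 + 1)) := by
  simp [List.zipIdx_cons, List.zipIdx_succ]

theorem pvMaskStr_cons (c : Char) (cs : List Char) (m : Nat) :
    pvMaskStr (c :: cs) (m : Int) = pvPhi c (m.testBit 0) :: pvMaskStr cs ((m / 2 : Nat) : Int) := by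
  simp only [pvMaskStr, pvZipIdxCons, List.map_cons, List.map_map]
  congr 1
  · rw [pvBandBit m 0, pvPhi]
  · apply List.map_congr_left
    intro p hp
    simp only [Function.comp]
    rw [pvBandBit m (p.2 + 1), pvBandBit (m / 2) p.2, Nat.testBit_add_one]

theorem pvMasks (cs : List Char) :
    (List.range (2 ^ cs.length)).map (fun m : Nat => pvMaskStr cs (m : Int)) = pvARaw cs := by
  induction cs with
  | nil => simp [pvMaskStr, pvARaw, List.range_one]
  | cons c cs ih =>
    rw [pvARaw, ← ih]
    rw [show (2 : Nat) ^ (c :: cs).length = 2 * 2 ^ cs.length by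
      simp [List.length_cons, pow_succ]; ring]
    rw [pvRangeDouble, List.map_flatMap, List.flatMap_map]
    apply List.flatMap_congr
    intro q hq
    simp only [List.map_cons, List.map_nil]
    rw [pvMaskStr_cons, pvMaskStr_cons]
    rw [show (2 * q).testBit 0 = false by simp [Nat.testBit_zero],
      show (2 * q + 1).testBit 0 = true by simp [Nat.testBit_zero],
      show (2 * q) / 2 = q by omega, show (2 * q + 1) / 2 = q by omega]

-- ===== B's product enumeration, structurally =====
def pvAll : List Char → List (List Char)
  | [] => [[]]
  | c :: cs => (pvAll cs).flatMap (fun v =>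
      (if PySem.Chars.isalpha c
       then [PySem.Chars.lowerChar c, PySem.Chars.upperChar c]
       else [PySem.Chars.lowerChar c]).map (· :: v))

theorem pvAcc (cs : List Char) :
    cs.reverse.foldl (fun acc ch =>
        let cases := if PySem.Chars.isalpha ch
          then [PySem.Chars.lowerChar ch, PySem.Chars.upperChar ch]
          else [PySem.Chars.lowerChar ch]
        acc.flatMap (fun v => cases.map (· :: v))) [[]] = pvAll cs := by
  induction cs with
  | nil => rfl
  | cons c cs ih =>
    rw [List.reverse_cons, List.foldl_append, ih]
    rfl

-- ===== the central dedup fact: first-dedup of A's masks is B's product =====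
theorem pvDD_ARaw (cs : List Char) : pvDD [] (pvARaw cs) = pvAll cs := by
  induction cs with
  | nil => rfl
  | cons c cs ih =>
    show pvDD [] ((pvARaw cs).flatMap (fun r => [pvPhi c false :: r, pvPhi c true :: r])) = _
    rw [pvDD_flatMap _ (pvARaw cs) (by
      intro r₁ _ r₂ _ y hy1 hy2
      simp only [List.mem_cons, List.not_mem_nil, or_false] at hy1 hy2
      rcases hy1 with rfl | rfl <;> rcases hy2 with h | h <;>
        exact (List.cons.injEq _ _ _ _ ▸ h).2 ▸ rfl), ih]
    show _ = (pvAll cs).flatMap _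
    apply List.flatMap_congr
    intro r _
    by_cases ha : PySem.Chars.isalpha c = true
    · have hne : pvPhi c false :: r ≠ pvPhi c true :: r := by
        simp only [pvPhi, ha, Bool.true_and, Bool.and_false, ne_eq, List.cons.injEq]
        intro ⟨h1, _⟩
        exact pvLowerNeUpper c ha (by simpa using h1)
      rw [pvDD_eq_self _ _ (by simp [hne]) (by simp)]
      simp [pvPhi, ha]
    · have hb : PySem.Chars.isalpha c = false := by simpa using ha
      simp [pvDD, pvPhi, hb]

theorem pvNodup_pvAll (cs : List Char) : (pvAll cs).Nodup := by
  rw [← pvDD_ARaw]; exact nodup_pvDD _ _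

-- ===== basic-phase lemmas =====
theorem pvGet (m : String) : PySem.Dict.get? pvCaseFuncs m =
    (if m == "lower" then some PySem.Str.lower
     else if m == "upper" then some PySem.Str.upper
     else if m == "title" then some pvTitle
     else if m == "asis" then some (fun s => s)
     else none) := by
  have hi : pvCaseFuncs.items =
      [("lower", PySem.Str.lower), ("upper", PySem.Str.upper),
       ("title", pvTitle), ("asis", fun s => s)] := rfl
  simp only [PySem.Dict.get?, hi, List.find?]
  by_cases h1 : m = "lower"
  · simp [h1]
  · rw [if_neg (by simp [h1])]
    rw [show (("lower" : String) == m) = false by simp [Ne.symm h1]]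
    by_cases h2 : m = "upper"
    · simp [h2]
    · rw [if_neg (by simp [h2]), show (("upper" : String) == m) = false by simp [Ne.symm h2]]
      by_cases h3 : m = "title"
      · simp [h3]
      · rw [if_neg (by simp [h3]), show (("title" : String) == m) = false by simp [Ne.symm h3]]
        by_cases h4 : m = "asis"
        · simp [h4]
        · rw [if_neg (by simp [h4]), show (("asis" : String) == m) = false by simp [Ne.symm h4]]
          rfl

theorem pvBasicA (tok : String) (modes : List String) :
    modes.foldl (fun acc m =>
      if m == "lower" then acc ++ [PySem.Str.lower tok]
      else if m == "upper" then acc ++ [PySem.Str.upper tok]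
      else if m == "title" then acc ++ [pvTitle tok]
      else if m == "asis" then acc ++ [tok]
      else acc) [] = modes.flatMap (pvModeVal tok) := by
  have hstep : (fun (acc : List String) m =>
      if m == "lower" then acc ++ [PySem.Str.lower tok]
      else if m == "upper" then acc ++ [PySem.Str.upper tok]
      else if m == "title" then acc ++ [pvTitle tok]
      else if m == "asis" then acc ++ [tok]
      else acc) = (fun acc m => acc ++ pvModeVal tok m) := by
    funext acc m
    simp only [pvModeVal]
    split_ifs <;> simp
  rw [hstep, PySem.List.foldl_append_eq_flatMap]
  simp

theorem pvBasicB (tok : String) (modes : List String) :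
    ∀ st : PySem.Set String × List String,
    modes.foldl (fun st m =>
      match PySem.Dict.get? pvCaseFuncs m with
      | none => st
      | some f => pvStep st (f tok)) st
      = (modes.flatMap (pvModeVal tok)).foldl pvStep st := by
  induction modes with
  | nil => intro st; rfl
  | cons m ms ih =>
    intro st
    simp only [List.foldl_cons, List.flatMap_cons, List.foldl_append]
    rw [← ih]
    congr 1
    rw [pvGet]
    simp only [pvModeVal]
    split_ifs <;> rfl

-- ===== assembly =====
set_option maxHeartbeats 1000000 in
theorem pvMain (token : String) (modes : List String) (full_case_max_len : Int) :
    case_variants token modes full_case_max_len = case_variants_alt token modes full_case_max_len := by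
  unfold case_variants case_variants_alt
  simp only []
  set tok := PySem.Str.strip token with htok
  set cs := tok.toList with hcs
  -- basic phase: both states equal
  rw [pvBasicA tok modes, pvBasicB tok modes]
  set st0 := (modes.flatMap (pvModeVal tok)).foldl pvStep (PySem.Set.empty, []) with hst0
  by_cases hc : "allcases" ∈ modes ∧ PySem.Str.len tok ≤ full_case_max_len
  · rw [if_pos hc, if_pos hc]
    rw [pvAcc cs]
    rw [pvShift cs.length, PySem.List.pyRange_zero_nat]
    have hin : ∀ mask : Int,
        List.foldl (fun s ic =>
          if (PySem.Chars.isalpha ic.1 && PySem.Int.band mask ((1 : Int) <<< (ic.2 : Int)) != 0) = true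
          then s ++ [PySem.Chars.upperChar ic.1]
          else s ++ [PySem.Chars.lowerChar ic.1]) [] cs.zipIdx = pvMaskStr cs mask := by
      intro mask
      have hf : (fun (s : List Char) (ic : Char × Nat) =>
          if (PySem.Chars.isalpha ic.1 && PySem.Int.band mask ((1 : Int) <<< (ic.2 : Int)) != 0) = true
          then s ++ [PySem.Chars.upperChar ic.1]
          else s ++ [PySem.Chars.lowerChar ic.1])
          = (fun s ic => s ++ [if (PySem.Chars.isalpha ic.1 && PySem.Int.band mask ((1 : Int) <<< (ic.2 : Int)) != 0) = true
              then PySem.Chars.upperChar ic.1 else PySem.Chars.lowerChar ic.1]) := by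
        funext s ic
        split_ifs <;> rfl
      rw [hf, PySem.List.foldl_append_singleton_eq_map]
      simp [pvMaskStr]
    have houter : (fun (st : PySem.Set String × List String) (mask : Int) =>
        pvStep st (String.ofList (List.foldl (fun s ic =>
          if (PySem.Chars.isalpha ic.1 && PySem.Int.band mask ((1 : Int) <<< (ic.2 : Int)) != 0) = true
          then s ++ [PySem.Chars.upperChar ic.1]
          else s ++ [PySem.Chars.lowerChar ic.1]) [] cs.zipIdx)))
        = (fun st mask => pvStep st (String.ofList (pvMaskStr cs mask))) := by
      funext st mask
      rw [hin]
    rw [houter, List.foldl_map,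
      ← List.foldl_map (f := fun m : Nat => String.ofList (pvMaskStr cs (m : Int))) (g := pvStep),
      ← List.foldl_map (f := fun v : List Char => String.ofList v) (g := pvStep)]
    rw [show (List.range (2 ^ cs.length)).map (fun m : Nat => String.ofList (pvMaskStr cs (m : Int)))
        = ((List.range (2 ^ cs.length)).map (fun m : Nat => pvMaskStr cs (m : Int))).map String.ofList by
      rw [List.map_map]; rfl]
    rw [pvMasks cs]
    clear_value st0
    obtain ⟨S, out⟩ := st0
    have hinj : Function.Injective String.ofList := fun a b h => String.ofList_inj.mp h
    have h1 := pvDD_map String.ofList hinj (pvARaw cs) []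
    have h2 := pvDD_map String.ofList hinj (pvAll cs) []
    simp only [List.map_nil] at h1 h2
    have hdd : pvDD S ((pvARaw cs).map String.ofList) = pvDD S ((pvAll cs).map String.ofList) := by
      rw [pvDD_base ((pvARaw cs).map String.ofList) S, pvDD_base ((pvAll cs).map String.ofList) S,
        h1, h2, pvDD_ARaw, pvDD_eq_self _ _ (pvNodup_pvAll cs) (by simp)]
    rw [pvEmitFold, pvEmitFold, hdd]
  · rw [if_neg hc, if_neg hc]

-- ===== VERDICT (by name: the statement is the Claim_ definition above) =====
theorem case_variants_spec : Claim_equal_case_variants := by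
  intro token modes full_case_max_len _
  exact pvMain token modes full_case_max_len
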